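-- pv_equiv track=rewrite | github.com/benjamin-swain/meltingpot-2023-solution | hard_code_clean_up.py | get_apple_meetup_agent_spot
-- ===== SOURCE A (Python) =====
-- def get_apple_meetup_agent_spot(sand, grass, water):
--     """given RGB image, identify SAND pixels with a GRASS pixel above it and a WATER pixel to the left of it.
--     return the one with the minimum column value"""
--     # Convert pixel location lists to sets for faster lookup
--     sand_set = set(sand)
--     grass_set = set(grass)
--     water_set = set(water)
--
--     # Initialize variables to store the result
--     result = None
--     min_column = float('inf')
--
--     # Iterate through each pixel in the sand list
--     for x, y in sand_set:
--         # Check if there is a grass pixel directly above the current sand pixel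
--         if (x-1, y) in grass_set:
--             # Check if there are no water pixels on any column of the same row to the right of the current sand pixel
--             if all((x, col) not in water_set for col in range(y+1, 11)):
--                 # Update result if current sand pixel has a smaller column value
--                 if y < min_column:
--                     result = (x, y)
--                     min_column = y
--
--     return result
-- ===== SOURCE B (Python) =====
-- def get_apple_meetup_agent_spot(sand, grass, water):
--     """given RGB image, identify SAND pixels with a GRASS pixel above it and a WATER pixel to the left of it.
--     return the one with the minimum column value"""
--     grass_set = set(grass)
--     water_set = set(water)
--     # Scan the distinct sand pixels in increasing column order (stable sort);
--     # the first qualifying pixel is the answer.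
--     for x, y in sorted(set(sand), key=lambda p: p[1]):
--         if (x - 1, y) in grass_set and all((x, col) not in water_set for col in range(y + 1, 11)):
--             return (x, y)
--     return None
-- ===== Notes on version B (the rewrite author's own statement) =====
-- stated objective: alternative
-- what changed: Replaces A's running-minimum fold over set(sand) by a sort-then-scan: B stably sorts the distinct sand pixels by column once and returns the first qualifying pixel of that ordered scan, with no min_column bookkeeping.
-- outside the precondition, e.g. on get_apple_meetup_agent_spot([(0, 2), (8, 2)], [(-1, 2), (7, 2)], []): A returns (8, 2), B returns (8, 2)
import Mathlib
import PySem

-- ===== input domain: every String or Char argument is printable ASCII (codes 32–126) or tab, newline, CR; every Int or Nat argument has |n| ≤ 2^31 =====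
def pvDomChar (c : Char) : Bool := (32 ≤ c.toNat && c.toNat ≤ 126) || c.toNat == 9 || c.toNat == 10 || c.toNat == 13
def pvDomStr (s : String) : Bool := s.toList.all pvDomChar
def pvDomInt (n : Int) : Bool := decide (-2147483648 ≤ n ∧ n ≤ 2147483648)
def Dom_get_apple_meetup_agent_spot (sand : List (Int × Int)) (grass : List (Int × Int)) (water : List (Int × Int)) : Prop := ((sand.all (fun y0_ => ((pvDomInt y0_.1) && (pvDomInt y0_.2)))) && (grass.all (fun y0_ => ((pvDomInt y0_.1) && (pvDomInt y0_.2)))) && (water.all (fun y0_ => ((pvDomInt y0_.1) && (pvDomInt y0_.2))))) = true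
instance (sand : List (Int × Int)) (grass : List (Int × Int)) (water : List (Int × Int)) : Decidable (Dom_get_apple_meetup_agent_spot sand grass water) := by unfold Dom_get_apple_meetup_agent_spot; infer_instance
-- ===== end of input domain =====

-- B replaces A's running-minimum fold over set(sand) by a stable sort-by-column followed by a
-- first-match scan (alternative decomposition, same cost); return values proved equal on Pre_.


-- "does pixel p qualify": grass directly above, no water in columns y+1..10 of the same row.
-- Shared vocabulary of Pre_ and the proofs; each port spells the condition out itself.
def pvQual (grass_set water_set : List (Int × Int)) (p : Int × Int) : Bool :=
  PySem.Set.contains grass_set (p.1 - 1, p.2) &&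
    (PySem.List.pyRange (p.2 + 1) 11 1).all (fun col => !(PySem.Set.contains water_set (p.1, col)))

-- ===== PORT A =====
-- loop body of A's 'for x, y in sand_set' (min_column = float('inf') modelled as `none`)
def pvStepA (grass_set water_set : List (Int × Int)) (st : Option (Int × Int) × Option Int)
    (xy : Int × Int) : Option (Int × Int) × Option Int :=
  let (result, min_column) := st
  let (x, y) := xy
  if PySem.Set.contains grass_set (x - 1, y) then
    if (PySem.List.pyRange (y + 1) 11 1).all (fun col => !(PySem.Set.contains water_set (x, col))) then
      match min_column with
      | none => (some (x, y), some y)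
      | some m => if y < m then (some (x, y), some y) else (result, min_column)
    else (result, min_column)
  else (result, min_column)

def get_apple_meetup_agent_spot (sand : List (Int × Int)) (grass : List (Int × Int)) (water : List (Int × Int)) : Option (Int × Int) :=
  let sand_set := PySem.Set.ofList sand
  let grass_set := PySem.Set.ofList grass
  let water_set := PySem.Set.ofList water
  (sand_set.foldl (pvStepA grass_set water_set) (none, none)).1

-- ===== PORT B =====
-- Source B's loop: scan, return the first qualifying pixel
def pvScanB (grass_set water_set : List (Int × Int)) : List (Int × Int) → Option (Int × Int)
  | [] => none
  | (x, y) :: rest =>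
    if PySem.Set.contains grass_set (x - 1, y) &&
        (PySem.List.pyRange (y + 1) 11 1).all (fun col => !(PySem.Set.contains water_set (x, col))) then
      some (x, y)
    else pvScanB grass_set water_set rest

def get_apple_meetup_agent_spot_alt (sand : List (Int × Int)) (grass : List (Int × Int)) (water : List (Int × Int)) : Option (Int × Int) :=
  let grass_set := PySem.Set.ofList grass
  let water_set := PySem.Set.ofList water
  pvScanB grass_set water_set (PySem.List.sorted (PySem.Set.ofList sand) (fun p => p.2))

-- ===== PRECONDITION & SPEC =====
-- Pre_ excludes inputs on which two distinct qualifying sand pixels share a column: when that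
-- column is the minimal qualifying one, A's (and B's) pick among them follows Python's
-- hash-dependent set iteration order, which no port can reproduce.
def Pre_get_apple_meetup_agent_spot (sand : List (Int × Int)) (grass : List (Int × Int)) (water : List (Int × Int)) : Prop :=
  ∀ p ∈ sand, ∀ q ∈ sand, p.2 = q.2 → pvQual grass water p = true → pvQual grass water q = true → p = q
instance (sand : List (Int × Int)) (grass : List (Int × Int)) (water : List (Int × Int)) : Decidable (Pre_get_apple_meetup_agent_spot sand grass water) := by unfold Pre_get_apple_meetup_agent_spot; infer_instance

def pvWitness_get_apple_meetup_agent_spot : (List (Int × Int)) × (List (Int × Int)) × (List (Int × Int)) :=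
  ([(3, 2), (5, 7)], [(2, 2)], [(5, 9)])

def Spec_get_apple_meetup_agent_spot (sand : List (Int × Int)) (grass : List (Int × Int)) (water : List (Int × Int)) (out : Option (Int × Int)) : Prop := out = get_apple_meetup_agent_spot_alt sand grass water
instance (sand : List (Int × Int)) (grass : List (Int × Int)) (water : List (Int × Int)) (out : Option (Int × Int)) : Decidable (Spec_get_apple_meetup_agent_spot sand grass water out) := by unfold Spec_get_apple_meetup_agent_spot; infer_instance

-- ===== CLAIM (what is proved, stated in full; the proofs are below) =====
def Claim_equal_get_apple_meetup_agent_spot : Prop := ∀ (sand : List (Int × Int)) (grass : List (Int × Int)) (water : List (Int × Int)), Dom_get_apple_meetup_agent_spot sand grass water → Pre_get_apple_meetup_agent_spot sand grass water → Spec_get_apple_meetup_agent_spot sand grass water (get_apple_meetup_agent_spot sand grass water)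

-- ===== LEMMAS AND PROOFS =====

-- the inline condition of both loop bodies IS pvQual
theorem pvQual_def (gs ws : List (Int × Int)) (x y : Int) :
    (PySem.Set.contains gs (x - 1, y) &&
      (PySem.List.pyRange (y + 1) 11 1).all (fun col => !(PySem.Set.contains ws (x, col)))) =
    pvQual gs ws (x, y) := rfl

-- B's scan is the first-match search
theorem pvScanB_eq_find? (gs ws : List (Int × Int)) (l : List (Int × Int)) :
    pvScanB gs ws l = l.find? (pvQual gs ws) := by
  induction l with
  | nil => rfl
  | cons p rest ih =>
    obtain ⟨x, y⟩ := p
    rw [pvScanB, List.find?_cons, pvQual_def, ih]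
    cases hq : pvQual gs ws (x, y) <;> simp

-- A's loop body leaves the state alone on a non-qualifying pixel …
theorem pvStepA_of_neg (gs ws : List (Int × Int)) (st : Option (Int × Int) × Option Int)
    (x y : Int) (hq : pvQual gs ws (x, y) = false) :
    pvStepA gs ws st (x, y) = st := by
  obtain ⟨r, m⟩ := st
  have h : (PySem.Set.contains gs (x - 1, y) &&
      (PySem.List.pyRange (y + 1) 11 1).all (fun col => !(PySem.Set.contains ws (x, col)))) = false := hq
  rw [Bool.and_eq_false_iff] at h
  cases hc : PySem.Set.contains gs (x - 1, y) with
  | false => simp only [pvStepA, hc, Bool.false_eq_true, if_false]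
  | true =>
    rcases h with h | h
    · rw [hc] at h; exact absurd h (by simp)
    · simp only [pvStepA, hc, h, Bool.false_eq_true, if_false, if_true]

-- … and on a qualifying one updates exactly like a first-min search
theorem pvStepA_of_pos_none (gs ws : List (Int × Int)) (x y : Int)
    (hq : pvQual gs ws (x, y) = true) :
    pvStepA gs ws (none, none) (x, y) = (some (x, y), some y) := by
  have h := hq
  rw [← pvQual_def, Bool.and_eq_true] at h
  simp only [pvStepA, h.1, h.2, if_true]

theorem pvStepA_of_pos_some (gs ws : List (Int × Int)) (b : Int × Int) (m x y : Int)
    (hq : pvQual gs ws (x, y) = true) :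
    pvStepA gs ws (some b, some m) (x, y) =
      if y < m then (some (x, y), some y) else (some b, some m) := by
  have h := hq
  rw [← pvQual_def, Bool.and_eq_true] at h
  simp only [pvStepA, h.1, h.2, if_true]

-- inserting a non-qualifying pixel does not change the first qualifier
theorem find?_insertBy_of_neg (gs ws : List (Int × Int)) (bf : (Int × Int) → (Int × Int) → Bool)
    (p : Int × Int) (hp : pvQual gs ws p = false) (ys : List (Int × Int)) :
    (PySem.List.insertBy bf p ys).find? (pvQual gs ws) = ys.find? (pvQual gs ws) := by
  induction ys with
  | nil => simp [PySem.List.insertBy, List.find?, hp]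
  | cons z t ih =>
    simp only [PySem.List.insertBy]
    split
    · simp [List.find?, hp]
    · simp only [List.find?]
      cases hz : pvQual gs ws z <;> simp [ih]

-- inserting a qualifying pixel into a column-sorted list: the first qualifier becomes the
-- earlier-column one, ties going to the already-present element
theorem find?_insertBy_of_pos (gs ws : List (Int × Int)) (p : Int × Int)
    (hp : pvQual gs ws p = true) (ys : List (Int × Int))
    (hs : ys.Pairwise (fun a b => a.2 ≤ b.2)) :
    (PySem.List.insertBy (fun a b => decide (a.2 < b.2)) p ys).find? (pvQual gs ws) =
      match ys.find? (pvQual gs ws) with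
      | none => some p
      | some b => if p.2 < b.2 then some p else some b := by
  induction ys with
  | nil => simp [PySem.List.insertBy, List.find?, hp]
  | cons z t ih =>
    rw [List.pairwise_cons] at hs
    simp only [PySem.List.insertBy]
    split
    · rename_i hlt
      rw [decide_eq_true_iff] at hlt
      simp only [List.find?, hp]
      cases hz : pvQual gs ws z
      · cases hf : t.find? (pvQual gs ws) with
        | none => simp
        | some b =>
          have hb : z.2 ≤ b.2 := hs.1 b (List.mem_of_find?_eq_some hf)
          simp [show p.2 < b.2 by omega]
      · simp [hlt]
    · rename_i hge
      rw [decide_eq_true_iff] at hge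
      simp only [List.find?]
      cases hz : pvQual gs ws z
      · simp only [ih hs.2]
      · simp [show ¬ p.2 < z.2 by omega]

-- invariant of A's fold: after any prefix l, the state is exactly the first qualifier of the
-- column-sorted prefix together with its column
theorem foldA_eq_find?_sorted (gs ws : List (Int × Int)) (l : List (Int × Int)) :
    l.foldl (pvStepA gs ws) (none, none) =
      ((PySem.List.sorted l (fun p => p.2)).find? (pvQual gs ws),
       ((PySem.List.sorted l (fun p => p.2)).find? (pvQual gs ws)).map (·.2)) := by
  induction l using List.reverseRecOn with
  | nil => rfl
  | append_singleton l p ih =>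
    rw [List.foldl_append, List.foldl_cons, List.foldl_nil, ih]
    have hins : PySem.List.sorted (l ++ [p]) (fun p => p.2) =
        PySem.List.insertBy (fun a b => decide (a.2 < b.2)) p
          (PySem.List.sorted l (fun p => p.2)) := by
      rw [PySem.List.sorted_eq_foldl_insertBy, PySem.List.sorted_eq_foldl_insertBy,
        List.foldl_append, List.foldl_cons, List.foldl_nil]
    rw [hins]
    obtain ⟨x, y⟩ := p
    cases hq : pvQual gs ws (x, y) with
    | false =>
      rw [find?_insertBy_of_neg gs ws _ _ hq]
      cases hf : (PySem.List.sorted l (fun p => p.2)).find? (pvQual gs ws) with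
      | none => simp only [Option.map_none]; exact pvStepA_of_neg gs ws _ x y hq
      | some b => simp only [Option.map_some]; exact pvStepA_of_neg gs ws _ x y hq
    | true =>
      rw [find?_insertBy_of_pos gs ws _ hq _ (PySem.List.sorted_pairwise l (fun p => p.2))]
      cases hf : (PySem.List.sorted l (fun p => p.2)).find? (pvQual gs ws) with
      | none =>
        simp only [Option.map_none]
        rw [pvStepA_of_pos_none gs ws x y hq]
        simp
      | some b =>
        simp only [Option.map_some]
        rw [pvStepA_of_pos_some gs ws b b.2 x y hq]
        by_cases hyb : y < b.2 <;> simp [hyb]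

-- ===== VERDICT (by name: the statement is the Claim_ definition above) =====
theorem get_apple_meetup_agent_spot_spec : Claim_equal_get_apple_meetup_agent_spot := by
  intro sand grass water _ _
  unfold Spec_get_apple_meetup_agent_spot
  show ((PySem.Set.ofList sand).foldl
      (pvStepA (PySem.Set.ofList grass) (PySem.Set.ofList water)) (none, none)).1 =
    pvScanB (PySem.Set.ofList grass) (PySem.Set.ofList water)
      (PySem.List.sorted (PySem.Set.ofList sand) (fun p => p.2))
  rw [pvScanB_eq_find?, foldA_eq_find?_sorted]
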